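-- pv_equiv track=rewrite | github.com/ZefusX/Essence-sans-d-penses | Prix essence/get.py | afficher_important
-- ===== SOURCE A (Python) =====
-- def afficher_important(data):
--     liste_important = ["latitude","longitude","adresse","ville","gazole_prix", "sp95_prix", "e85_prix", "gplc_prix", "e10_prix", "sp98_prix"]
--     ls=[]
--     for element in data:
--         for i in range(len(liste_important)):
--             if liste_important[i] in element:
--                 ls.append(element)
--     result = []
--     current_sublist = []
--     for element in ls:
--         if "latitude" in element:
--             if current_sublist:  # Ajoute la sous-liste courante à la liste résultat si elle n'est pas vide
--                 result.append(current_sublist)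
--             current_sublist = [element]  # Commence une nouvelle sous-liste avec l'élément actuel
--         else:
--             current_sublist.append(element)
--     if current_sublist:
--         result.append(current_sublist)  # Ajoute la dernière sous-liste à la liste résultat si elle n'est pas vide
--     return result
-- ===== SOURCE B (Python) =====
-- def afficher_important(data):
--     liste_important = ["latitude","longitude","adresse","ville","gazole_prix", "sp95_prix", "e85_prix", "gplc_prix", "e10_prix", "sp98_prix"]
--     ls = [element for element in data for kw in liste_important if kw in element]
--
--     # split off one group at a time: its head element followed by the run of
--     # following elements that do not contain "latitude"
--     result = []
--     rest = ls
--     while rest: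
--         i = 1
--         while i < len(rest) and "latitude" not in rest[i]:
--             i += 1
--         result.append(rest[:i])
--         rest = rest[i:]
--     return result
-- ===== Notes on version B (the rewrite author's own statement) =====
-- stated objective: simpler
-- what changed: The keyword filter becomes a single comprehension and the streaming result/current_sublist accumulator loop (with its empty-check flushes) is replaced by a splitter that peels off one whole group at a time: a head element plus the following run of non-'latitude' elements.
import Mathlib
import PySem

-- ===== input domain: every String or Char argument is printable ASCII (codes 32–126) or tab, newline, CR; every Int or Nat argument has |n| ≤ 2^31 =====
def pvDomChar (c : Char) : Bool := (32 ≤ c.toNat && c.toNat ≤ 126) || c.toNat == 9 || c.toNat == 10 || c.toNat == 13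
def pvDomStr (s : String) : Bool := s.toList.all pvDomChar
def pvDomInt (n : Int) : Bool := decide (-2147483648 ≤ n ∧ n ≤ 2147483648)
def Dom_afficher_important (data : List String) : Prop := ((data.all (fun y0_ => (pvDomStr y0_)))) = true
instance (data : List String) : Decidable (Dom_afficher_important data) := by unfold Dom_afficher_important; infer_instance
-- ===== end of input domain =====

-- B replaces A's streaming result/current_sublist accumulator by a splitter peeling off one group at a time; objective: simpler (measured faster in a timing run).

-- ===== PORT A =====
def pvListeImportant : List String := ["latitude","longitude","adresse","ville","gazole_prix", "sp95_prix", "e85_prix", "gplc_prix", "e10_prix", "sp98_prix"]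

def afficher_important (data : List String) : List (List String) :=
  let ls : List String := data.foldl (fun ls element =>
    (PySem.List.pyRange 0 (pvListeImportant.length : Int) 1).foldl (fun ls i =>
      if PySem.Str.isIn (PySem.List.pyGetD pvListeImportant i "") element then ls ++ [element] else ls) ls) []
  let rc : List (List String) × List String := ls.foldl (fun st element =>
      if PySem.Str.isIn "latitude" element then
        (if st.2 ≠ [] then (st.1 ++ [st.2], [element]) else (st.1, [element]))
      else (st.1, st.2 ++ [element])) ([], [])
  if rc.2 ≠ [] then rc.1 ++ [rc.2] else rc.1

-- ===== PORT B =====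
-- inner while loop of Source B: the run of elements not containing "latitude", and the remainder
def pvRun : List String → List String × List String
  | [] => ([], [])
  | x :: xs =>
    if PySem.Str.isIn "latitude" x then ([], x :: xs)
    else
      let p := pvRun xs
      (x :: p.1, p.2)

theorem pvRun_snd_length_le : ∀ (xs : List String), (pvRun xs).2.length ≤ xs.length
  | [] => Nat.le_refl _
  | x :: xs => by
    simp only [pvRun]
    split
    · simp
    · exact Nat.le_succ_of_le (pvRun_snd_length_le xs)

-- outer while loop of Source B (rest shrinks each turn), as structural recursion
def pvGroups : List String → List (List String)
  | [] => []
  | x :: xs => (x :: (pvRun xs).1) :: pvGroups (pvRun xs).2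
  termination_by l => l.length
  decreasing_by
    exact Nat.lt_succ_of_le (pvRun_snd_length_le xs)

def afficher_important_alt (data : List String) : List (List String) :=
  let ls : List String := data.flatMap (fun element =>
    (pvListeImportant.filter (fun kw => PySem.Str.isIn kw element)).map (fun _ => element))
  pvGroups ls

-- ===== PRECONDITION & SPEC =====
def Spec_afficher_important (data : List String) (out : List (List String)) : Prop := out = afficher_important_alt data
instance (data : List String) (out : List (List String)) : Decidable (Spec_afficher_important data out) := by unfold Spec_afficher_important; infer_instance

-- ===== CLAIM (what is proved, stated in full; the proofs are below) =====
def Claim_equal_afficher_important : Prop := ∀ (data : List String), Dom_afficher_important data → Spec_afficher_important data (afficher_important data)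

-- ===== LEMMAS AND PROOFS =====

-- proof-only helpers naming A's grouping step and final flush (defeq to the lambdas in afficher_important)
def pvStep (st : List (List String) × List String) (element : String) : List (List String) × List String :=
  if PySem.Str.isIn "latitude" element then
    (if st.2 ≠ [] then (st.1 ++ [st.2], [element]) else (st.1, [element]))
  else (st.1, st.2 ++ [element])

def pvFlush (rc : List (List String) × List String) : List (List String) :=
  if rc.2 ≠ [] then rc.1 ++ [rc.2] else rc.1

-- A's inner keyword loop over range(len(liste_important)) equals B's filter-based stream, one element at a time.
theorem pv_filter_step (element : String) (acc : List String) :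
    (PySem.List.pyRange 0 (pvListeImportant.length : Int) 1).foldl (fun ls i =>
      if PySem.Str.isIn (PySem.List.pyGetD pvListeImportant i "") element then ls ++ [element] else ls) acc
    = acc ++ (pvListeImportant.filter (fun kw => PySem.Str.isIn kw element)).map (fun _ => element) := by
  rw [PySem.List.foldl_pyRange_zero_pyGetD' pvListeImportant ""
      (fun ls kw => if PySem.Str.isIn kw element then ls ++ [element] else ls) acc]
  exact PySem.List.foldl_append_if (fun kw => PySem.Str.isIn kw element) (fun _ => element) pvListeImportant acc

-- A's outer filter loop builds exactly B's flatMap stream.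
theorem pv_ls_eq (data : List String) :
    data.foldl (fun ls element =>
      (PySem.List.pyRange 0 (pvListeImportant.length : Int) 1).foldl (fun ls i =>
        if PySem.Str.isIn (PySem.List.pyGetD pvListeImportant i "") element then ls ++ [element] else ls) ls) []
    = data.flatMap (fun element =>
        (pvListeImportant.filter (fun kw => PySem.Str.isIn kw element)).map (fun _ => element)) := by
  suffices h : ∀ (acc : List String),
      data.foldl (fun ls element =>
        (PySem.List.pyRange 0 (pvListeImportant.length : Int) 1).foldl (fun ls i =>
          if PySem.Str.isIn (PySem.List.pyGetD pvListeImportant i "") element then ls ++ [element] else ls) ls) acc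
      = acc ++ data.flatMap (fun element =>
          (pvListeImportant.filter (fun kw => PySem.Str.isIn kw element)).map (fun _ => element)) by
    simpa using h []
  induction data with
  | nil => intro acc; simp
  | cons x xs ih =>
    intro acc
    rw [List.foldl_cons, pv_filter_step, ih]
    simp

-- A's grouping loop (with the trailing flush) equals pvGroups, via an invariant over (result, current_sublist).
theorem pv_loop_eq : ∀ (ls : List String) (result : List (List String)) (cur : List String),
    pvFlush (ls.foldl pvStep (result, cur))
    = result ++ (if cur = [] then pvGroups ls
                 else (cur ++ (pvRun ls).1) :: pvGroups (pvRun ls).2)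
  | [], result, cur => by
    by_cases h : cur = [] <;> simp [h, pvFlush, pvGroups, pvRun]
  | x :: xs, result, cur => by
    rw [List.foldl_cons]
    by_cases hl : PySem.Str.isIn "latitude" x = true <;>
      simp at hl <;> by_cases hc : cur = []
    · rw [show pvStep (result, cur) x = (result, [x]) by simp [pvStep, hl, hc]]
      rw [pv_loop_eq xs result [x]]
      simp [pvGroups, hc]
    · rw [show pvStep (result, cur) x = (result ++ [cur], [x]) by simp [pvStep, hl, hc]]
      rw [pv_loop_eq xs (result ++ [cur]) [x]]
      simp [pvGroups, pvRun, hl, hc]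
    · rw [show pvStep (result, cur) x = (result, [x]) by simp [pvStep, hl, hc]]
      rw [pv_loop_eq xs result [x]]
      simp [pvGroups, pvRun, hl, hc]
    · rw [show pvStep (result, cur) x = (result, cur ++ [x]) by simp [pvStep, hl]]
      rw [pv_loop_eq xs result (cur ++ [x])]
      have hcx : cur ++ [x] ≠ [] := by simp
      simp [pvRun, hl, hc, hcx, pvGroups]

-- ===== VERDICT (by name: the statement is the Claim_ definition above) =====
theorem afficher_important_spec : Claim_equal_afficher_important := by
  intro data _
  show afficher_important data = afficher_important_alt data
  show pvFlush ((data.foldl (fun ls element =>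
      (PySem.List.pyRange 0 (pvListeImportant.length : Int) 1).foldl (fun ls i =>
        if PySem.Str.isIn (PySem.List.pyGetD pvListeImportant i "") element then ls ++ [element] else ls) ls) []).foldl pvStep ([], []))
    = afficher_important_alt data
  rw [pv_ls_eq data]
  unfold afficher_important_alt
  simpa using pv_loop_eq _ [] []
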